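-- pv_equiv track=rewrite | github.com/SauravBhattarai19/wdxx-precipitation-indices | data_processing/10_WD50R_Chronological_Precipitation_Index.py | create_spatial_chunks
-- ===== SOURCE A (Python) =====
-- def create_spatial_chunks(n_lat, n_lon, chunk_size_lat=50, chunk_size_lon=100):
--     """Create spatial chunks for parallel processing."""
--     chunks = []
--     for lat_start in range(0, n_lat, chunk_size_lat):
--         lat_end = min(lat_start + chunk_size_lat, n_lat)
--         for lon_start in range(0, n_lon, chunk_size_lon):
--             lon_end = min(lon_start + chunk_size_lon, n_lon)
--             chunks.append((lat_start, lat_end, lon_start, lon_end))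
--     return chunks
-- ===== SOURCE B (Python) =====
-- def create_spatial_chunks(n_lat, n_lon, chunk_size_lat=50, chunk_size_lon=100):
--     """Create spatial chunks for parallel processing."""
--     n_i = max(0, -(-n_lat // chunk_size_lat))
--     if n_i == 0:
--         return []
--     n_j = max(0, -(-n_lon // chunk_size_lon))
--     def chunk(k):
--         i, j = k // n_j, k % n_j
--         ls = i * chunk_size_lat
--         os_ = j * chunk_size_lon
--         return (ls, min(ls + chunk_size_lat, n_lat),
--                 os_, min(os_ + chunk_size_lon, n_lon))
--     return [chunk(k) for k in range(n_i * n_j)]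
-- ===== Notes on version B (the rewrite author's own statement) =====
-- stated objective: alternative
-- what changed: B computes the number of chunks per axis in closed form by ceiling division and generates the chunk list in one flat loop over chunk indices, decoding each flat index into (row, col) with divmod, instead of A's nested scans over coordinate start values.
import Mathlib
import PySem

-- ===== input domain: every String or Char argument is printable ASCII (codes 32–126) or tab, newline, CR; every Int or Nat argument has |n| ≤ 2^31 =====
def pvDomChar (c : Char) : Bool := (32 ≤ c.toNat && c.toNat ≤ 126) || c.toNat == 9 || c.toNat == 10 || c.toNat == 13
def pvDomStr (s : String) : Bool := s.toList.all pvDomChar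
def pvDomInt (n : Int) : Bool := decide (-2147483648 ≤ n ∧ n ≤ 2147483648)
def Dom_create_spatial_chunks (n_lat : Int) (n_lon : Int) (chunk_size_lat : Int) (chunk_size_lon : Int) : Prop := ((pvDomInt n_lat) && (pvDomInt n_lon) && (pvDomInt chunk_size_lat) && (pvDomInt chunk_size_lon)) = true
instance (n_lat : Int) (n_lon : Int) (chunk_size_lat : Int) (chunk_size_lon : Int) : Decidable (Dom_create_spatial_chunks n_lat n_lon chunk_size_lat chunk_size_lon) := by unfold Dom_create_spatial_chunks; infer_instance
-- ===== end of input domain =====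

-- ===== PORT A =====
-- B replaces A's nested coordinate scans by closed-form ceiling-division chunk
-- counts and ONE flat loop over chunk indices decoded with divmod
-- (objective: alternative algorithm; same result wherever A returns).
def create_spatial_chunks (n_lat : Int) (n_lon : Int) (chunk_size_lat : Int) (chunk_size_lon : Int) : List (Int × Int × Int × Int) :=
  (PySem.List.pyRange 0 n_lat chunk_size_lat).foldl (fun chunks lat_start =>
    let lat_end := min (lat_start + chunk_size_lat) n_lat
    (PySem.List.pyRange 0 n_lon chunk_size_lon).foldl (fun chunks lon_start =>
      let lon_end := min (lon_start + chunk_size_lon) n_lon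
      chunks ++ [(lat_start, lat_end, lon_start, lon_end)]) chunks) []

-- ===== PORT B =====
def create_spatial_chunks_alt (n_lat : Int) (n_lon : Int) (chunk_size_lat : Int) (chunk_size_lon : Int) : List (Int × Int × Int × Int) :=
  let n_i := max 0 (-(PySem.Int.floordiv (-n_lat) chunk_size_lat))
  if n_i = 0 then []
  else
    let n_j := max 0 (-(PySem.Int.floordiv (-n_lon) chunk_size_lon))
    let chunk := fun (k : Int) =>
      let i := PySem.Int.floordiv k n_j
      let j := PySem.Int.mod k n_j
      let ls := i * chunk_size_lat
      let os := j * chunk_size_lon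
      (ls, min (ls + chunk_size_lat) n_lat, os, min (os + chunk_size_lon) n_lon)
    (PySem.List.pyRange 0 (n_i * n_j) 1).map chunk

-- ===== PRECONDITION & SPEC =====
-- Pre_ excludes exactly the inputs where A raises: range() raises ValueError on a
-- zero step, i.e. chunk_size_lat = 0, or chunk_size_lon = 0 with a nonempty lat range.
def Pre_create_spatial_chunks (n_lat : Int) (n_lon : Int) (chunk_size_lat : Int) (chunk_size_lon : Int) : Prop :=
  chunk_size_lat ≠ 0 ∧ (chunk_size_lon ≠ 0 ∨ (0 < chunk_size_lat ∧ n_lat ≤ 0) ∨ (chunk_size_lat < 0 ∧ 0 ≤ n_lat))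
instance (n_lat : Int) (n_lon : Int) (chunk_size_lat : Int) (chunk_size_lon : Int) : Decidable (Pre_create_spatial_chunks n_lat n_lon chunk_size_lat chunk_size_lon) := by unfold Pre_create_spatial_chunks; infer_instance
def pvWitness_create_spatial_chunks : Int × Int × Int × Int := (120, 250, 50, 100)

def Spec_create_spatial_chunks (n_lat : Int) (n_lon : Int) (chunk_size_lat : Int) (chunk_size_lon : Int) (out : List (Int × Int × Int × Int)) : Prop := out = create_spatial_chunks_alt n_lat n_lon chunk_size_lat chunk_size_lon
instance (n_lat : Int) (n_lon : Int) (chunk_size_lat : Int) (chunk_size_lon : Int) (out : List (Int × Int × Int × Int)) : Decidable (Spec_create_spatial_chunks n_lat n_lon chunk_size_lat chunk_size_lon out) := by unfold Spec_create_spatial_chunks; infer_instance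

-- ===== CLAIM (what is proved, stated in full; the proofs are below) =====
def Claim_equal_create_spatial_chunks : Prop := ∀ (n_lat : Int) (n_lon : Int) (chunk_size_lat : Int) (chunk_size_lon : Int), Dom_create_spatial_chunks n_lat n_lon chunk_size_lat chunk_size_lon → Pre_create_spatial_chunks n_lat n_lon chunk_size_lat chunk_size_lon → Spec_create_spatial_chunks n_lat n_lon chunk_size_lat chunk_size_lon (create_spatial_chunks n_lat n_lon chunk_size_lat chunk_size_lon)

-- ===== LEMMAS AND PROOFS =====

-- A's nested appending loops are a flatMap of maps.
theorem fold_nested_append {α β γ : Type} (R : List β) (g : α → β → γ) :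
    ∀ (L : List α) (acc : List γ),
      L.foldl (fun chunks ls => R.foldl (fun c os => c ++ [g ls os]) chunks) acc
        = acc ++ L.flatMap (fun ls => R.map (g ls)) := by
  intro L
  induction L with
  | nil => intro acc; simp
  | cons a t ih =>
      intro acc
      rw [List.foldl_cons, ih, PySem.List.foldl_append_singleton_eq_map,
        List.flatMap_cons, List.append_assoc]

-- Python's range(0,n,s) count for a positive step equals B's ceiling division.
theorem cnt_pos (n s : Int) (hs : 0 < s) :
    (if 0 < n then ((n + s - 1) / s).toNat else 0)
      = (max 0 (-(PySem.Int.floordiv (-n) s))).toNat := by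
  set q := -(PySem.Int.floordiv (-n) s) with hq
  have hb : (q - 1) * s < n ∧ n ≤ q * s :=
    (PySem.Int.neg_floordiv_neg_eq_iff_of_pos hs).mp hq.symm
  by_cases hn : 0 < n
  · have hqpos : 0 < q := by
      by_contra h
      push_neg at h
      have := mul_le_mul_of_nonneg_right h hs.le
      simp at this
      linarith [hb.2]
    have hdiv : (n + s - 1) / s = q := by
      have hb1 := hb.1
      rw [sub_mul, one_mul] at hb1
      have h1 : q ≤ (n + s - 1) / s :=
        (Int.le_ediv_iff_mul_le hs).mpr (by linarith)
      have h2 : (n + s - 1) / s < q + 1 :=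
        (Int.ediv_lt_iff_lt_mul hs).mpr (by rw [add_mul, one_mul]; linarith [hb.2])
      omega
    rw [if_pos hn, hdiv]
    omega
  · rw [if_neg hn]
    have h0 : 0 ≤ PySem.Int.floordiv (-n) s := by
      simp only [PySem.Int.floordiv]
      exact Int.fdiv_nonneg (by omega) hs.le
    omega

-- range(0, n, s) is the first (ceil count) multiples of s.
theorem pyRange_zero_count (n s : Int) (hs : s ≠ 0) :
    PySem.List.pyRange 0 n s
      = (List.range (max 0 (-(PySem.Int.floordiv (-n) s))).toNat).map (fun k : Nat => s * (k : Int)) := by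
  have key : (if 0 < s then (if (0:Int) < n then ((n - 0 + s - 1) / s).toNat else 0)
        else (if n < 0 then ((0 - n + -s - 1) / (-s)).toNat else 0))
      = (max 0 (-(PySem.Int.floordiv (-n) s))).toNat := by
    by_cases hsp : 0 < s
    · rw [if_pos hsp, show n - 0 + s - 1 = n + s - 1 by ring]
      exact cnt_pos n s hsp
    · have hsn : s < 0 := by omega
      rw [if_neg hsp, show (0:Int) - n + -s - 1 = -n + -s - 1 by ring,
        show PySem.Int.floordiv (-n) s = PySem.Int.floordiv n (-s) from by
          simpa using PySem.Int.floordiv_neg_neg n (-s)]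
      have h := cnt_pos (-n) (-s) (by omega)
      simp only [neg_pos, neg_neg] at h
      exact h
  simp only [PySem.List.pyRange, hs, if_false]
  rw [key]
  simp only [zero_add]

-- Decoding a flat index with div/mod enumerates the product grid row-major.
theorem range_mul_flatMap {γ : Type} (b : Nat) (g : Nat → Nat → γ) :
    ∀ a, (List.range (a * b)).map (fun k => g (k / b) (k % b))
      = (List.range a).flatMap (fun i => (List.range b).map (fun j => g i j)) := by
  intro a
  rcases Nat.eq_zero_or_pos b with hb | hb
  · subst hb; simp
  · induction a with
    | zero => simp
    | succ a ih =>
        rw [Nat.succ_mul, List.range_add, List.map_append, ih, List.range_succ,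
          List.flatMap_append]
        congr 1
        simp only [List.flatMap_cons, List.flatMap_nil, List.append_nil, List.map_map]
        apply List.map_congr_left
        intro j hj
        have hj' : j < b := List.mem_range.mp hj
        simp only [Function.comp]
        have hd : (a * b + j) / b = a := by
          rw [Nat.add_comm, Nat.mul_comm, Nat.add_mul_div_left j a hb,
            Nat.div_eq_of_lt hj', Nat.zero_add]
        have hm : (a * b + j) % b = j := by
          rw [Nat.add_comm, Nat.mul_comm, Nat.add_mul_mod_self_left,
            Nat.mod_eq_of_lt hj']
        rw [hd, hm]

theorem csc_eq (n_lat n_lon cla clo : Int)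
    (hp : Pre_create_spatial_chunks n_lat n_lon cla clo) :
    create_spatial_chunks n_lat n_lon cla clo = create_spatial_chunks_alt n_lat n_lon cla clo := by
  obtain ⟨hcla, hor⟩ := hp
  unfold create_spatial_chunks create_spatial_chunks_alt
  rw [fold_nested_append]
  set qi := max 0 (-(PySem.Int.floordiv (-n_lat) cla)) with hqi
  by_cases hzi : qi = 0
  · rw [if_pos hzi, pyRange_zero_count n_lat cla hcla, ← hqi, hzi]
    simp
  · rw [if_neg hzi]
    -- a nonempty lat range forces chunk_size_lon ≠ 0 under Pre_
    have hclo : clo ≠ 0 := by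
      rcases hor with h | ⟨h1, h2⟩ | ⟨h1, h2⟩
      · exact h
      · exfalso; apply hzi
        have h0 : 0 ≤ PySem.Int.floordiv (-n_lat) cla := by
          simp only [PySem.Int.floordiv]
          exact Int.fdiv_nonneg (by omega) h1.le
        omega
      · exfalso; apply hzi
        have h0 : 0 ≤ PySem.Int.floordiv (-n_lat) cla := by
          rw [show PySem.Int.floordiv (-n_lat) cla = PySem.Int.floordiv n_lat (-cla) from by
            simpa using PySem.Int.floordiv_neg_neg n_lat (-cla)]
          simp only [PySem.Int.floordiv]
          exact Int.fdiv_nonneg h2 (by omega)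
        omega
    set qj := max 0 (-(PySem.Int.floordiv (-n_lon) clo)) with hqj
    have hqi0 : (0:Int) ≤ qi := hqi ▸ le_max_left _ _
    have hqj0 : (0:Int) ≤ qj := hqj ▸ le_max_left _ _
    rw [pyRange_zero_count n_lat cla hcla, pyRange_zero_count n_lon clo hclo, ← hqi, ← hqj]
    clear_value qi qj
    obtain ⟨Ni, hNi⟩ : ∃ m : Nat, qi = (m : Int) := ⟨qi.toNat, (Int.toNat_of_nonneg hqi0).symm⟩
    obtain ⟨Nj, hNj⟩ : ∃ m : Nat, qj = (m : Int) := ⟨qj.toNat, (Int.toNat_of_nonneg hqj0).symm⟩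
    subst hNi; subst hNj
    simp only [PySem.List.pyRange_one, sub_zero, zero_add, ← Int.natCast_mul,
      Int.toNat_natCast, List.map_map, List.flatMap_map, List.nil_append,
      Function.comp_def, PySem.Int.floordiv_natCast, PySem.Int.mod_natCast]
    have hprod := range_mul_flatMap (γ := Int × Int × Int × Int) Nj
      (fun i j => (((i : Int)) * cla, min (((i : Int)) * cla + cla) n_lat,
        ((j : Int)) * clo, min (((j : Int)) * clo + clo) n_lon)) Ni
    beta_reduce at hprod
    rw [hprod]
    congr 1
    funext i
    congr 1
    funext j
    simp [Int.mul_comm]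

-- ===== VERDICT (by name: the statement is the Claim_ definition above) =====
theorem create_spatial_chunks_spec : Claim_equal_create_spatial_chunks := by
  intro a b c d _ hp
  unfold Spec_create_spatial_chunks
  exact csc_eq a b c d hp
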